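-- pv_equiv track=rewrite | github.com/umoqnier/scifitnofat | ui/genetic_algorithm.py | classify_by_dishtypes
-- ===== SOURCE A (Python) =====
-- def classify_by_dishtypes(dishtypes: list[str]) -> str:
--     ds = set([d.lower() for d in dishtypes])
--     breakfast_keys = {"breakfast", "morning", "morning meal", "merienda", "desayuno"}
--     lunch_keys = {"lunch", "main course", "main", "almuerzo", "comida", "side dish"}
--     dinner_keys = {"dinner", "supper", "cena"}
--     if ds & breakfast_keys:
--         return "breakfast"
--     if ds & lunch_keys:
--         return "lunch"
--     if ds & dinner_keys:
--         return "dinner"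
--     return "lunch"
-- ===== SOURCE B (Python) =====
-- # Single inverted-index pass keeping the minimum-priority match instead of
-- # three set-intersection checks.
-- _PRIORITY = {}
-- for _k in ("breakfast", "morning", "morning meal", "merienda", "desayuno"):
--     _PRIORITY[_k] = (0, "breakfast")
-- for _k in ("lunch", "main course", "main", "almuerzo", "comida", "side dish"):
--     _PRIORITY[_k] = (1, "lunch")
-- for _k in ("dinner", "supper", "cena"):
--     _PRIORITY[_k] = (2, "dinner")
--
--
-- def classify_by_dishtypes(dishtypes: list[str]) -> str:
--     best = None
--     for d in dishtypes:
--         hit = _PRIORITY.get(d.lower())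
--         if hit is not None and (best is None or hit[0] < best[0]):
--             best = hit
--     return "lunch" if best is None else best[1]
-- ===== Notes on version B (the rewrite author's own statement) =====
-- stated objective: alternative
-- what changed: Replaces building a set of lowered labels and three separate set-intersection truthiness checks by one inverted-index dict (keyword -> (priority, category)) and a single pass keeping the minimum-priority hit, with 'lunch' as the no-match default.
import Mathlib
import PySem

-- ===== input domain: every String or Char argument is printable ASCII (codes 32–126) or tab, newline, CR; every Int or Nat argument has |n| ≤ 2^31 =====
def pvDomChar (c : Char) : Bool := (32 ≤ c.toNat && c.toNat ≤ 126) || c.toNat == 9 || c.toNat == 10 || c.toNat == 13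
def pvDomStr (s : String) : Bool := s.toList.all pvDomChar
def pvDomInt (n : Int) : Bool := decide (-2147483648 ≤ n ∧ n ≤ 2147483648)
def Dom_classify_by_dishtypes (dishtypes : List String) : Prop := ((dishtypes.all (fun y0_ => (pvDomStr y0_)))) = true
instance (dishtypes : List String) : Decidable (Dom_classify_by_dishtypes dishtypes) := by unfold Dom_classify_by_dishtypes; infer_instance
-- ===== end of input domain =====

-- B replaces A's three set-intersection checks by one inverted-index dict pass keeping the minimum-priority hit (alternative decomposition, same cost).

-- ===== PORT A =====
def classify_by_dishtypes (dishtypes : List String) : String :=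
  let ds : PySem.Set String := PySem.Set.ofList (dishtypes.map PySem.Str.lower)
  let breakfast_keys : PySem.Set String :=
    PySem.Set.ofList ["breakfast", "morning", "morning meal", "merienda", "desayuno"]
  let lunch_keys : PySem.Set String :=
    PySem.Set.ofList ["lunch", "main course", "main", "almuerzo", "comida", "side dish"]
  let dinner_keys : PySem.Set String := PySem.Set.ofList ["dinner", "supper", "cena"]
  if PySem.Set.inter ds breakfast_keys ≠ [] then "breakfast"
  else if PySem.Set.inter ds lunch_keys ≠ [] then "lunch"
  else if PySem.Set.inter ds dinner_keys ≠ [] then "dinner"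
  else "lunch"

-- ===== PORT B =====
-- module-level dict of Source B: keyword -> (priority, category), built by three insertion loops
def pvPriority : PySem.Dict String (Int × String) :=
  let d1 := ["breakfast", "morning", "morning meal", "merienda", "desayuno"].foldl
      (fun d k => d.insert k ((0 : Int), "breakfast")) PySem.Dict.empty
  let d2 := ["lunch", "main course", "main", "almuerzo", "comida", "side dish"].foldl
      (fun d k => d.insert k ((1 : Int), "lunch")) d1
  ["dinner", "supper", "cena"].foldl (fun d k => d.insert k ((2 : Int), "dinner")) d2

-- loop body of Source B
def pvStep (best : Option (Int × String)) (d : String) : Option (Int × String) :=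
  match PySem.Dict.get? pvPriority (PySem.Str.lower d) with
  | none => best
  | some hit =>
    match best with
    | none => some hit
    | some b => if hit.1 < b.1 then some hit else best

def classify_by_dishtypes_alt (dishtypes : List String) : String :=
  match dishtypes.foldl pvStep none with
  | none => "lunch"
  | some b => b.2

-- ===== PRECONDITION & SPEC =====
def Spec_classify_by_dishtypes (dishtypes : List String) (out : String) : Prop := out = classify_by_dishtypes_alt dishtypes
instance (dishtypes : List String) (out : String) : Decidable (Spec_classify_by_dishtypes dishtypes out) := by unfold Spec_classify_by_dishtypes; infer_instance

-- ===== CLAIM (what is proved, stated in full; the proofs are below) =====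
def Claim_equal_classify_by_dishtypes : Prop := ∀ (dishtypes : List String), Dom_classify_by_dishtypes dishtypes → Spec_classify_by_dishtypes dishtypes (classify_by_dishtypes dishtypes)

-- ===== LEMMAS AND PROOFS =====
def pvBreakfastKeys : List String := ["breakfast", "morning", "morning meal", "merienda", "desayuno"]
def pvLunchKeys : List String := ["lunch", "main course", "main", "almuerzo", "comida", "side dish"]
def pvDinnerKeys : List String := ["dinner", "supper", "cena"]

theorem pvPriority_eq : pvPriority = PySem.Dict.mk
      [("breakfast", ((0:Int), "breakfast")), ("morning", ((0:Int), "breakfast")),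
       ("morning meal", ((0:Int), "breakfast")), ("merienda", ((0:Int), "breakfast")),
       ("desayuno", ((0:Int), "breakfast")),
       ("lunch", ((1:Int), "lunch")), ("main course", ((1:Int), "lunch")),
       ("main", ((1:Int), "lunch")), ("almuerzo", ((1:Int), "lunch")),
       ("comida", ((1:Int), "lunch")), ("side dish", ((1:Int), "lunch")),
       ("dinner", ((2:Int), "dinner")), ("supper", ((2:Int), "dinner")),
       ("cena", ((2:Int), "dinner"))] := by decide

theorem get?_pvPriority (s : String) :
    PySem.Dict.get? pvPriority s =
      if s ∈ pvBreakfastKeys then some ((0 : Int), "breakfast")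
      else if s ∈ pvLunchKeys then some ((1 : Int), "lunch")
      else if s ∈ pvDinnerKeys then some ((2 : Int), "dinner")
      else none := by
  by_cases hb : s ∈ pvBreakfastKeys
  · rw [if_pos hb]
    simp only [pvBreakfastKeys, List.mem_cons, List.not_mem_nil, or_false] at hb
    rcases hb with rfl | rfl | rfl | rfl | rfl <;> decide
  rw [if_neg hb]
  by_cases hl : s ∈ pvLunchKeys
  · rw [if_pos hl]
    simp only [pvLunchKeys, List.mem_cons, List.not_mem_nil, or_false] at hl
    rcases hl with rfl | rfl | rfl | rfl | rfl | rfl <;> decide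
  rw [if_neg hl]
  by_cases hd : s ∈ pvDinnerKeys
  · rw [if_pos hd]
    simp only [pvDinnerKeys, List.mem_cons, List.not_mem_nil, or_false] at hd
    rcases hd with rfl | rfl | rfl <;> decide
  rw [if_neg hd]
  simp only [pvBreakfastKeys, pvLunchKeys, pvDinnerKeys, List.mem_cons, List.not_mem_nil,
    or_false, not_or] at hb hl hd
  simp [pvPriority_eq, PySem.Dict.get?_mk_cons, beq_iff_eq,
    Ne.symm hb.1, Ne.symm hb.2.1, Ne.symm hb.2.2.1, Ne.symm hb.2.2.2.1, Ne.symm hb.2.2.2.2,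
    Ne.symm hl.1, Ne.symm hl.2.1, Ne.symm hl.2.2.1, Ne.symm hl.2.2.2.1, Ne.symm hl.2.2.2.2.1, Ne.symm hl.2.2.2.2.2,
    Ne.symm hd.1, Ne.symm hd.2.1, Ne.symm hd.2.2]
  rfl

def pvCombine (a b : Option (Int × String)) : Option (Int × String) :=
  match a, b with
  | none, b => b
  | some x, none => some x
  | some x, some y => if y.1 < x.1 then some y else some x

theorem pvStep_eq (a : Option (Int × String)) (d : String) :
    pvStep a d = pvCombine a (PySem.Dict.get? pvPriority (PySem.Str.lower d)) := by
  unfold pvStep pvCombine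
  cases PySem.Dict.get? pvPriority (PySem.Str.lower d) <;> cases a <;> rfl

theorem pvCombine_assoc (a b c : Option (Int × String)) :
    pvCombine (pvCombine a b) c = pvCombine a (pvCombine b c) := by
  have hnone : ∀ t : Option (Int × String), pvCombine t none = t := fun t => by
    cases t <;> rfl
  rcases a with _ | x <;> rcases b with _ | y <;> rcases c with _ | z <;> try rfl
  · rw [hnone, hnone]
  · by_cases h1 : y.1 < x.1 <;> by_cases h2 : z.1 < y.1 <;>
      simp [pvCombine, h1, h2] <;> omega

theorem foldl_pvStep (xs : List String) (a : Option (Int × String)) :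
    xs.foldl pvStep a = pvCombine a (xs.foldl pvStep none) := by
  induction xs generalizing a with
  | nil => cases a <;> rfl
  | cons d xs ih =>
    simp only [List.foldl_cons]
    rw [ih (pvStep a d), ih (pvStep none d), pvStep_eq, pvStep_eq, pvCombine_assoc]
    rfl

def pvG (xs : List String) : Option (Int × String) :=
  if xs.any (fun d => decide (PySem.Str.lower d ∈ pvBreakfastKeys)) then some ((0 : Int), "breakfast")
  else if xs.any (fun d => decide (PySem.Str.lower d ∈ pvLunchKeys)) then some ((1 : Int), "lunch")
  else if xs.any (fun d => decide (PySem.Str.lower d ∈ pvDinnerKeys)) then some ((2 : Int), "dinner")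
  else none

theorem foldl_pvStep_eq_pvG (xs : List String) : xs.foldl pvStep none = pvG xs := by
  induction xs with
  | nil => rfl
  | cons d xs ih =>
    simp only [List.foldl_cons]
    rw [foldl_pvStep, ih, pvStep_eq, get?_pvPriority]
    unfold pvG pvCombine
    simp only [List.any_cons]
    by_cases h1 : PySem.Str.lower d ∈ pvBreakfastKeys <;>
      by_cases h2 : PySem.Str.lower d ∈ pvLunchKeys <;>
        by_cases h3 : PySem.Str.lower d ∈ pvDinnerKeys <;>
          by_cases h4 : xs.any (fun d => decide (PySem.Str.lower d ∈ pvBreakfastKeys)) = true <;>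
            by_cases h5 : xs.any (fun d => decide (PySem.Str.lower d ∈ pvLunchKeys)) = true <;>
              by_cases h6 : xs.any (fun d => decide (PySem.Str.lower d ∈ pvDinnerKeys)) = true <;>
                simp_all <;> split_ifs <;> simp_all

theorem inter_ne_nil (xs K : List String) :
    (PySem.Set.inter (PySem.Set.ofList (xs.map PySem.Str.lower)) (PySem.Set.ofList K) ≠ []) ↔
      xs.any (fun d => decide (PySem.Str.lower d ∈ K)) = true := by
  rw [Ne, List.eq_nil_iff_forall_not_mem]
  push Not
  simp only [PySem.Set.mem_inter, PySem.Set.mem_ofList, List.any_eq_true, List.mem_map,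
    decide_eq_true_eq]
  constructor
  · rintro ⟨y, ⟨d, hd, rfl⟩, hK⟩; exact ⟨d, hd, hK⟩
  · rintro ⟨d, hd, hK⟩; exact ⟨PySem.Str.lower d, ⟨d, hd, rfl⟩, hK⟩

-- ===== VERDICT (by name: the statement is the Claim_ definition above) =====
theorem classify_by_dishtypes_spec : Claim_equal_classify_by_dishtypes := by
  intro xs _
  unfold Spec_classify_by_dishtypes classify_by_dishtypes classify_by_dishtypes_alt
  rw [foldl_pvStep_eq_pvG]
  unfold pvG
  have ib := inter_ne_nil xs pvBreakfastKeys
  have il := inter_ne_nil xs pvLunchKeys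
  have idn := inter_ne_nil xs pvDinnerKeys
  simp only [pvBreakfastKeys, pvLunchKeys, pvDinnerKeys] at ib il idn ⊢
  simp only [ib, il, idn]
  split_ifs <;> rfl
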